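-- pv_equiv track=rewrite | github.com/xiaoyue10131748/data_policy_analyzer | customizeNER/Ner/xiaoyue/featureByAllenNLP/train_data/code/parse_tree.py | find_closest_words
-- ===== SOURCE A (Python) =====
-- def same_word(word1, word2):
--     if word1.strip()==word2.strip() or word1.strip() in word2.strip() or word2.strip() in word1.strip() :
--         return True
--     else:
--         return False
--
-- def find_closest_words(index,word,leaf_values):
--     if leaf_values[index] == word:
--         return index
--
--     left_index = index
--     right_index = index
--
--     while left_index >= 0 and not same_word(leaf_values[left_index],word) :
--         left_index -=1
--
--     while right_index < len(leaf_values) and not same_word(leaf_values[right_index],word):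
--         right_index +=1
--
--     if (index - left_index) < (right_index-index):
--         return left_index
--     else:
--         return right_index
-- ===== SOURCE B (Python) =====
-- def same_word(word1, word2):
--     if word1.strip()==word2.strip() or word1.strip() in word2.strip() or word2.strip() in word1.strip() :
--         return True
--     else:
--         return False
--
-- def find_closest_words(index, word, leaf_values):
--     if leaf_values[index] == word:
--         return index
--     n = len(leaf_values)
--     d = 0
--     while True:
--         if index + d >= n or same_word(leaf_values[index + d], word):
--             return index + d
--         if index - d < 0 or same_word(leaf_values[index - d], word):
--             return index - d
--         d += 1
-- ===== Notes on version B (the rewrite author's own statement) =====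
-- stated objective: alternative
-- what changed: Replaces A's two separate full one-directional while-scans (left to -1, right to len) followed by a distance comparison with a single expanding-distance loop over d = 0, 1, 2, ... that checks index+d then index-d and returns the first match or boundary hit, so only the nearer side is scanned to its stopping point.
import Mathlib
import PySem

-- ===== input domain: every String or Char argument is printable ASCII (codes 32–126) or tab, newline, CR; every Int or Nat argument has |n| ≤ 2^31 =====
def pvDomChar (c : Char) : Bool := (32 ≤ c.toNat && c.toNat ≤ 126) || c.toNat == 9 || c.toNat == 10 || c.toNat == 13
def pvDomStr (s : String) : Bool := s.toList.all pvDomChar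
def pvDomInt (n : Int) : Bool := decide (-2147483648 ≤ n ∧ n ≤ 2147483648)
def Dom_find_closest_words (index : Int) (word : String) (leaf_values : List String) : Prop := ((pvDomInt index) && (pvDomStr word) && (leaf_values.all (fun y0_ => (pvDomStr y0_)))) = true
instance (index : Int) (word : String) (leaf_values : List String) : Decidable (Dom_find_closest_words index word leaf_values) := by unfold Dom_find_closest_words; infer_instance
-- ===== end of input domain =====

-- B replaces A's two full one-directional while-scans plus a final distance comparison by a single
-- expanding-distance loop (d = 0, 1, 2, …, right candidate checked before left); objective: alternative.

-- shared helper (same_word appears verbatim in both Python sources)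
def sameWord (word1 word2 : String) : Bool :=
  if (PySem.Str.strip word1 == PySem.Str.strip word2)
      || PySem.Str.isIn (PySem.Str.strip word1) (PySem.Str.strip word2)
      || PySem.Str.isIn (PySem.Str.strip word2) (PySem.Str.strip word1)
  then true else false

-- ===== PORT A =====
-- left while-loop of A; list access totalized with getD "" (inside Pre_ the index is always in range)
def fcwLeft (word : String) (leaf_values : List String) (li : Int) : Int :=
  if _h : li ≥ 0 ∧ ¬ (sameWord ((PySem.List.pyGet? leaf_values li).getD "") word = true)
  then fcwLeft word leaf_values (li - 1)
  else li
termination_by (li + 1).toNat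
decreasing_by omega

-- right while-loop of A
def fcwRight (word : String) (leaf_values : List String) (ri : Int) : Int :=
  if _h : ri < (leaf_values.length : Int) ∧ ¬ (sameWord ((PySem.List.pyGet? leaf_values ri).getD "") word = true)
  then fcwRight word leaf_values (ri + 1)
  else ri
termination_by ((leaf_values.length : Int) - ri).toNat
decreasing_by omega

def find_closest_words (index : Int) (word : String) (leaf_values : List String) : Int :=
  if (PySem.List.pyGet? leaf_values index).getD "" == word then index
  else
    let left_index := fcwLeft word leaf_values index
    let right_index := fcwRight word leaf_values index
    if index - left_index < right_index - index then left_index else right_index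

-- ===== PORT B =====
-- B's expanding-distance loop: at distance d check index+d (right) first, then index-d (left)
def fcwScan (word : String) (leaf_values : List String) (index d : Int) : Int :=
  if _h : index + d ≥ (leaf_values.length : Int) then index + d
  else if sameWord ((PySem.List.pyGet? leaf_values (index + d)).getD "") word then index + d
  else if index - d < 0 then index - d
  else if sameWord ((PySem.List.pyGet? leaf_values (index - d)).getD "") word then index - d
  else fcwScan word leaf_values index (d + 1)
termination_by ((leaf_values.length : Int) - index - d).toNat
decreasing_by omega

def find_closest_words_alt (index : Int) (word : String) (leaf_values : List String) : Int :=
  if (PySem.List.pyGet? leaf_values index).getD "" == word then index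
  else fcwScan word leaf_values index 0

-- ===== PRECONDITION & SPEC =====
-- Pre_ excludes exactly the inputs where A raises IndexError on leaf_values[index]
def Pre_find_closest_words (index : Int) (word : String) (leaf_values : List String) : Prop :=
  -(leaf_values.length : Int) ≤ index ∧ index < (leaf_values.length : Int)
instance (index : Int) (word : String) (leaf_values : List String) : Decidable (Pre_find_closest_words index word leaf_values) := by unfold Pre_find_closest_words; infer_instance

def pvWitness_find_closest_words : Int × String × List String := (1, "b", ["a", "c", "b"])

def Spec_find_closest_words (index : Int) (word : String) (leaf_values : List String) (out : Int) : Prop := out = find_closest_words_alt index word leaf_values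
instance (index : Int) (word : String) (leaf_values : List String) (out : Int) : Decidable (Spec_find_closest_words index word leaf_values out) := by unfold Spec_find_closest_words; infer_instance

-- ===== CLAIM (what is proved, stated in full; the proofs are below) =====
def Claim_equal_find_closest_words : Prop := ∀ (index : Int) (word : String) (leaf_values : List String), Dom_find_closest_words index word leaf_values → Pre_find_closest_words index word leaf_values → Spec_find_closest_words index word leaf_values (find_closest_words index word leaf_values)

-- ===== LEMMAS AND PROOFS =====

-- abbreviation for "same_word matches at position i"
def sw (word : String) (leaf_values : List String) (i : Int) : Bool :=
  sameWord ((PySem.List.pyGet? leaf_values i).getD "") word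

theorem fcwLeft_le (word : String) (lv : List String) (li : Int) : fcwLeft word lv li ≤ li := by
  fun_induction fcwLeft word lv li with
  | case1 li h ih => omega
  | case2 li h => omega

theorem fcwLeft_stop (word : String) (lv : List String) (li : Int) (h : -1 ≤ li) :
    -1 ≤ fcwLeft word lv li ∧ (fcwLeft word lv li = -1 ∨ sw word lv (fcwLeft word lv li) = true) := by
  fun_induction fcwLeft word lv li with
  | case1 li h2 ih => exact ih (by omega)
  | case2 li h2 =>
    push Not at h2
    by_cases hge : li ≥ 0
    · exact ⟨by omega, Or.inr (by simpa [sw] using h2 hge)⟩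
    · exact ⟨h, Or.inl (by omega)⟩

theorem fcwLeft_nomatch (word : String) (lv : List String) (li i : Int)
    (h1 : fcwLeft word lv li < i) (h2 : i ≤ li) : sw word lv i = false := by
  fun_induction fcwLeft word lv li with
  | case1 li h ih =>
    by_cases he : i = li
    · subst he; simpa [sw] using h.2
    · exact ih h1 (by omega)
  | case2 li h => omega

theorem fcwRight_ge (word : String) (lv : List String) (ri : Int) : ri ≤ fcwRight word lv ri := by
  fun_induction fcwRight word lv ri with
  | case1 ri h ih => omega
  | case2 ri h => omega

theorem fcwRight_stop (word : String) (lv : List String) (ri : Int) (h : ri ≤ (lv.length : Int)) :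
    fcwRight word lv ri ≤ (lv.length : Int) ∧
      (fcwRight word lv ri = (lv.length : Int) ∨ sw word lv (fcwRight word lv ri) = true) := by
  fun_induction fcwRight word lv ri with
  | case1 ri h2 ih => exact ih (by omega)
  | case2 ri h2 =>
    push Not at h2
    by_cases hlt : ri < (lv.length : Int)
    · exact ⟨by omega, Or.inr (by simpa [sw] using h2 hlt)⟩
    · exact ⟨by omega, Or.inl (by omega)⟩

theorem fcwRight_nomatch (word : String) (lv : List String) (ri i : Int)
    (h1 : ri ≤ i) (h2 : i < fcwRight word lv ri) : sw word lv i = false := by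
  fun_induction fcwRight word lv ri with
  | case1 ri h ih =>
    by_cases he : i = ri
    · subst he; simpa [sw] using h.2
    · exact ih (by omega) h2
  | case2 ri h => omega

-- the stopping points of A's scans seen from B's loop: if distance d is still inside both
-- scans and position index±d does not match, the corresponding scan went strictly further
theorem right_gt (word : String) (lv : List String) (index d : Int)
    (hn : index ≤ (lv.length : Int)) (hR : d ≤ fcwRight word lv index - index)
    (hb : ¬ index + d ≥ (lv.length : Int))
    (hsw : ¬ sameWord ((PySem.List.pyGet? lv (index + d)).getD "") word = true) :
    index + d < fcwRight word lv index := by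
  have hstop := fcwRight_stop word lv index hn
  rcases hstop.2 with h | h
  · rcases lt_or_eq_of_le (by omega : index + d ≤ fcwRight word lv index) with h2 | h2
    · exact h2
    · rw [← h2] at h; omega
  · rcases lt_or_eq_of_le (by omega : index + d ≤ fcwRight word lv index) with h2 | h2
    · exact h2
    · rw [← h2] at h; simp [sw] at h; simp [h] at hsw

theorem left_lt (word : String) (lv : List String) (index d : Int)
    (hidx : 0 ≤ index) (hL : d ≤ index - fcwLeft word lv index)
    (hl : ¬ index - d < 0)
    (hsw : ¬ sameWord ((PySem.List.pyGet? lv (index - d)).getD "") word = true) :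
    fcwLeft word lv index < index - d := by
  have hstop := fcwLeft_stop word lv index (by omega)
  rcases hstop.2 with h | h
  · omega
  · rcases lt_or_eq_of_le (by omega : fcwLeft word lv index ≤ index - d) with h2 | h2
    · exact h2
    · rw [h2] at h; simp [sw] at h; simp [h] at hsw

-- the key loop invariant for B's scan, relating it to A's two loop results
theorem fcwScan_eq (word : String) (lv : List String) (index d : Int)
    (hidx : 0 ≤ index) (hn : index ≤ (lv.length : Int)) (hd : 0 ≤ d)
    (hL : d ≤ index - fcwLeft word lv index) (hR : d ≤ fcwRight word lv index - index) :
    fcwScan word lv index d =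
      if index - fcwLeft word lv index < fcwRight word lv index - index
      then fcwLeft word lv index else fcwRight word lv index := by
  fun_induction fcwScan word lv index d with
  | case1 d hr =>
    -- index + d ≥ n: the right scan hit the end exactly at distance d
    have hstop := fcwRight_stop word lv index hn
    rw [if_neg (by omega)]; omega
  | case2 d hr hm =>
    -- match at index + d: it is the right scan's stopping point
    have : ¬ (index + d < fcwRight word lv index) := by
      intro hlt
      have := fcwRight_nomatch word lv index (index + d) (by omega) hlt
      simp [sw] at this; simp [this] at hm
    rw [if_neg (by omega)]; omega
  | case3 d hr hm hl =>
    -- index - d < 0: the left scan hit -1 exactly at distance d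
    have hstopL := fcwLeft_stop word lv index (by omega)
    have hRgt := right_gt word lv index d hn hR hr hm
    rw [if_pos (by omega)]; omega
  | case4 d hr hm hl hml =>
    -- match at index - d: it is the left scan's stopping point
    have hLlt : ¬ (fcwLeft word lv index < index - d) := by
      intro hlt
      have := fcwLeft_nomatch word lv index (index - d) hlt (by omega)
      simp [sw] at this; simp [this] at hml
    have hRgt := right_gt word lv index d hn hR hr hm
    rw [if_pos (by omega)]; omega
  | case5 d hr hm hl hml ih =>
    -- no match at distance d on either side: both scans went strictly further
    have hRgt := right_gt word lv index d hn hR hr hm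
    have hLlt := left_lt word lv index d hidx hL hl hml
    exact ih (by omega) (by omega) (by omega)

-- one-step unfoldings used in the negative-index case
theorem fcwLeft_neg (word : String) (lv : List String) (li : Int) (h : li < 0) :
    fcwLeft word lv li = li := by
  rw [fcwLeft]; rw [dif_neg (by omega)]

theorem fcwScan_eq_final (word : String) (lv : List String) (index : Int)
    (h1 : 0 ≤ index) (h2 : index < (lv.length : Int)) :
    fcwScan word lv index 0 =
      if index - fcwLeft word lv index < fcwRight word lv index - index
      then fcwLeft word lv index else fcwRight word lv index :=
  fcwScan_eq word lv index 0 h1 (by omega)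
    (by omega) (by have := fcwLeft_le word lv index; omega) (by have := fcwRight_ge word lv index; omega)

-- ===== VERDICT (by name: the statement is the Claim_ definition above) =====
theorem find_closest_words_spec : Claim_equal_find_closest_words := by
  intro index word lv _hdom hpre
  obtain ⟨hlo, hhi⟩ := hpre
  unfold Spec_find_closest_words find_closest_words find_closest_words_alt
  by_cases hw : ((PySem.List.pyGet? lv index).getD "" == word) = true
  · simp only [hw, if_true]
  · simp only [Bool.not_eq_true] at hw
    simp only [hw, Bool.false_eq_true, if_false]
    by_cases hidx : 0 ≤ index
    · rw [fcwScan_eq_final word lv index hidx hhi]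
    · -- negative in-range index: both programs return index
      have hn1 : 0 < (lv.length : Int) := by omega
      have hLeft : fcwLeft word lv index = index := fcwLeft_neg word lv index (by omega)
      rw [fcwScan]
      rw [dif_neg (by omega : ¬ index + 0 ≥ (lv.length : Int))]
      by_cases hsw : sameWord ((PySem.List.pyGet? lv (index + 0)).getD "") word = true
      · rw [if_pos hsw]
        have hR : fcwRight word lv index = index := by
          rw [fcwRight]; rw [dif_neg]; push Not; intro _
          simpa using hsw
        rw [hLeft, hR]; simp
      · rw [if_neg hsw, if_pos (by omega : index - 0 < 0)]
        have hR : fcwRight word lv index = fcwRight word lv (index + 1) := by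
          rw [fcwRight]; rw [dif_pos ⟨by omega, by simpa using hsw⟩]
        have hge := fcwRight_ge word lv (index + 1)
        rw [hLeft, hR, if_pos (by omega)]
        omega
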